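-- pv_equiv track=rewrite | github.com/debuggerone/comako | src/services/ftp_client.py | _extract_message_type
-- ===== SOURCE A (Python) =====
-- def _extract_message_type(filename: str, content: str) -> str:
--     """
--     Extract EDI message type from filename or content.
--
--     Args:
--         filename: File name
--         content: File content
--
--     Returns:
--         Message type (UTILMD, MSCONS, etc.)
--     """
--     # Try to extract from filename
--     if "UTILMD" in filename.upper():
--         return "UTILMD"
--     elif "MSCONS" in filename.upper():
--         return "MSCONS"
--     elif "APERAK" in filename.upper():
--         return "APERAK"
--
--     # Try to extract from content (UNH segment)
--     lines = content.split('\n')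
--     for line in lines:
--         if line.startswith('UNH+'):
--             segments = line.split('+')
--             if len(segments) >= 3:
--                 message_info = segments[2].split(':')
--                 if message_info:
--                     return message_info[0]
--
--     return "UNKNOWN"
-- ===== SOURCE B (Python) =====
-- def _extract_message_type(filename: str, content: str) -> str:
--     """Streaming re-implementation: check filename tokens in a loop, then
--     scan content line-by-line with str.partition instead of building split lists."""
--     upper_name = filename.upper()
--     for token in ("UTILMD", "MSCONS", "APERAK"):
--         if token in upper_name:
--             return token
--
--     rest = content
--     while True:
--         line, newline, rest = rest.partition('\n')
--         if line.startswith('UNH+'):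
--             _, plus, after = line[4:].partition('+')
--             if plus:
--                 out = []
--                 for ch in after:
--                     if ch == '+' or ch == ':':
--                         break
--                     out.append(ch)
--                 return ''.join(out)
--         if not newline:
--             return "UNKNOWN"
-- ===== Notes on version B (the rewrite author's own statement) =====
-- stated objective: alternative
-- what changed: The filename elif cascade becomes a loop over the three tokens, and the content parse no longer builds split lists: it streams over the content with str.partition on ' ' and '+' and a break-loop instead of split(' ')/split('+')/split(':') with indexing.
import Mathlib
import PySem

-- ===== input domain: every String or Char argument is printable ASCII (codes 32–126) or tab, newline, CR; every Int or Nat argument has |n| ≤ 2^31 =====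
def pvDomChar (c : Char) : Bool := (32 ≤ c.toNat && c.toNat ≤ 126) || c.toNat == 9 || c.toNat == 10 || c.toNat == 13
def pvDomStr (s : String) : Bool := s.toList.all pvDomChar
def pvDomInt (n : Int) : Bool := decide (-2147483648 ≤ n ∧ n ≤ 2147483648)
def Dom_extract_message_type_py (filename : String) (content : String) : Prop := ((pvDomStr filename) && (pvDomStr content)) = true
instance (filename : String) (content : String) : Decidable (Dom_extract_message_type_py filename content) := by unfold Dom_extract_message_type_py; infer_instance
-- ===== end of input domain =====

-- B replaces A's list-building splits with a streaming partition-based scan; objective: idiomatic/alternative.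

-- ===== PORT A =====
-- A's content loop: for line in content.split('\n'): if line.startswith('UNH+'): segments = line.split('+'); …
-- (ported at the List Char level via the PySem.Chars primitives)
def pyLoopA : List (List Char) → String
  | [] => "UNKNOWN"
  | line :: rest =>
    if PySem.Chars.startswith line ['U','N','H','+'] then
      let segments := PySem.Chars.splitOn line ['+']
      if 3 ≤ segments.length then
        let message_info := PySem.Chars.splitOn (segments.getD 2 []) [':']
        if message_info.isEmpty then pyLoopA rest else String.ofList (message_info.headD [])
      else pyLoopA rest
    else pyLoopA rest

def extract_message_type_py (filename : String) (content : String) : String :=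
  if PySem.Str.isIn "UTILMD" (PySem.Str.upper filename) then "UTILMD"
  else if PySem.Str.isIn "MSCONS" (PySem.Str.upper filename) then "MSCONS"
  else if PySem.Str.isIn "APERAK" (PySem.Str.upper filename) then "APERAK"
  else pyLoopA (PySem.Chars.splitOn content.toList ['\n'])

-- ===== PORT B =====
-- Source B's per-line work: line.startswith('UNH+'); line[4:].partition('+'); the break-loop over `after`.
-- partition('+') is ported as takeWhile/dropWhile on the char list; the break-loop is a takeWhile.
def pvUnh (line : List Char) : Option (List Char) :=
  if PySem.Chars.startswith line ['U','N','H','+'] then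
    match (line.drop 4).dropWhile (fun c => c != '+') with
    | _ :: after => some (after.takeWhile (fun c => !(c == '+' || c == ':')))
    | [] => none
  else none

-- Source B's while loop: line, newline, rest = rest.partition('\n'); …
-- (fuel only makes the recursion structural/kernel-reducible; it never runs out)
def pvScanGo : Nat → List Char → String
  | 0, _ => "UNKNOWN"
  | fuel + 1, cs =>
    match pvUnh (cs.takeWhile (fun c => c != '\n')) with
    | some out => String.ofList out
    | none =>
      match cs.dropWhile (fun c => c != '\n') with
      | [] => "UNKNOWN"
      | _ :: r => pvScanGo fuel r

def pvScan (cs : List Char) : String := pvScanGo (cs.length + 1) cs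

-- Source B's filename loop: for token in ("UTILMD", "MSCONS", "APERAK"): if token in upper_name: return token
def pvFindToken : List String → String → Option String
  | [], _ => none
  | t :: ts, u => if PySem.Str.isIn t u then some t else pvFindToken ts u

def extract_message_type_py_alt (filename : String) (content : String) : String :=
  match pvFindToken ["UTILMD", "MSCONS", "APERAK"] (PySem.Str.upper filename) with
  | some t => t
  | none => pvScan content.toList

-- ===== PRECONDITION & SPEC =====
def Spec_extract_message_type_py (filename : String) (content : String) (out : String) : Prop := out = extract_message_type_py_alt filename content
instance (filename : String) (content : String) (out : String) : Decidable (Spec_extract_message_type_py filename content out) := by unfold Spec_extract_message_type_py; infer_instance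

-- ===== CLAIM (what is proved, stated in full; the proofs are below) =====
def Claim_equal_extract_message_type_py : Prop := ∀ (filename : String) (content : String), Dom_extract_message_type_py filename content → Spec_extract_message_type_py filename content (extract_message_type_py filename content)

-- ===== LEMMAS AND PROOFS =====

-- The pieces of `cs.split(c)` for a one-character separator, defined by direct recursion.
def pvPieces (c : Char) (cs : List Char) : List (List Char) :=
  cs.takeWhile (fun x => x != c) ::
    (match hr : cs.dropWhile (fun x => x != c) with
     | [] => []
     | _ :: r => pvPieces c r)
termination_by cs.length
decreasing_by
  have h := List.length_dropWhile_le (fun x => x != c) cs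
  rw [hr] at h; simp at h ⊢; omega

theorem pvPieces_of_drop_nil {c : Char} {cs : List Char}
    (h : cs.dropWhile (fun x => x != c) = []) :
    pvPieces c cs = [cs.takeWhile (fun x => x != c)] := by
  rw [pvPieces]
  split
  · rfl
  · next a r heq => rw [h] at heq; cases heq

theorem pvPieces_of_drop_cons {c : Char} {cs : List Char} {a : Char} {r : List Char}
    (h : cs.dropWhile (fun x => x != c) = a :: r) :
    pvPieces c cs = cs.takeWhile (fun x => x != c) :: pvPieces c r := by
  rw [pvPieces]
  split
  · next heq => rw [h] at heq; cases heq
  · next b r' heq =>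
    rw [h] at heq
    cases heq
    rfl

theorem pvPieces_head (c : Char) (cs : List Char) :
    pvPieces c cs = cs.takeWhile (fun x => x != c) :: (pvPieces c cs).tail := by
  cases hd : cs.dropWhile (fun x => x != c) with
  | nil => rw [pvPieces_of_drop_nil hd]; simp
  | cons a r => rw [pvPieces_of_drop_cons hd]; simp

theorem pv_go_single (c : Char) : ∀ (fuel : Nat) (l cur : List Char) (acc : List (List Char)),
    l.length ≤ fuel →
    PySem.Chars.splitOn.go [c] fuel l cur acc =
      acc.reverse ++ (cur.reverse ++ l.takeWhile (fun x => x != c)) :: (pvPieces c l).tail := by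
  intro fuel
  induction fuel with
  | zero =>
    intro l cur acc h
    have hl : l = [] := List.eq_nil_of_length_eq_zero (Nat.le_zero.mp h)
    subst hl
    show ((cur.reverse ++ []) :: acc).reverse = _
    rw [pvPieces_of_drop_nil (by simp)]; simp
  | succ n ih =>
    intro l cur acc h
    cases l with
    | nil =>
      show (cur.reverse :: acc).reverse = _
      rw [pvPieces_of_drop_nil (by simp)]; simp
    | cons ch rest =>
      show (if ([c].isPrefixOf (ch::rest)) then PySem.Chars.splitOn.go [c] n (List.drop 1 (ch::rest)) [] (cur.reverse :: acc)
            else PySem.Chars.splitOn.go [c] n rest (ch::cur) acc) = _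
      have hlen : rest.length ≤ n := by simp at h; omega
      by_cases hch : ch = c
      · subst hch
        rw [if_pos (by simp [List.isPrefixOf])]
        rw [ih (List.drop 1 (ch::rest)) [] (cur.reverse :: acc) (by simpa using hlen)]
        rw [pvPieces_of_drop_cons (cs := ch :: rest) (a := ch) (r := rest) (by simp [List.dropWhile_cons])]
        rw [pvPieces_head ch rest]
        simp [List.takeWhile_cons]
      · have hdw : (ch :: rest).dropWhile (fun x => x != c) = rest.dropWhile (fun x => x != c) := by
          simp [List.dropWhile_cons, hch]
        rw [if_neg (by simp [List.isPrefixOf]; exact fun hc => (hch hc.symm).elim)]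
        rw [ih rest (ch::cur) acc hlen]
        cases hd : rest.dropWhile (fun x => x != c) with
        | nil =>
          rw [pvPieces_of_drop_nil (hdw.trans hd), pvPieces_of_drop_nil hd]
          simp [List.takeWhile_cons, hch]
        | cons a r =>
          rw [pvPieces_of_drop_cons (hdw.trans hd), pvPieces_of_drop_cons hd]
          simp [List.takeWhile_cons, hch]

theorem pv_splitOn_single (c : Char) (l : List Char) :
    PySem.Chars.splitOn l [c] = pvPieces c l := by
  show PySem.Chars.splitOn.go [c] (l.length + 1) l [] [] = _
  rw [pv_go_single c (l.length+1) l [] [] (by omega)]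
  rw [pvPieces_head c l]; simp

theorem pvPred (r : List Char) :
    (r.takeWhile (fun x => x != '+')).takeWhile (fun x => x != ':')
      = r.takeWhile (fun c => !(c == '+' || c == ':')) := by
  rw [List.takeWhile_takeWhile]
  congr 1
  funext x
  by_cases hx1 : x = '+' <;> by_cases hx2 : x = ':' <;> simp [hx1, hx2]

-- per-line: A's split-based branch equals Source B's partition-based pvUnh
theorem pvLine (line : List Char) (rest : List (List Char)) :
    pyLoopA (line :: rest) =
      (match pvUnh line with
       | some out => String.ofList out
       | none => pyLoopA rest) := by
  by_cases hs : PySem.Chars.startswith line ['U','N','H','+'] = true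
  · obtain ⟨t, ht⟩ := (PySem.Chars.startswith_iff line ['U','N','H','+']).mp hs
    subst ht
    simp only [pyLoopA, pvUnh, hs, if_pos]
    rw [pv_splitOn_single]
    rw [pvPieces_of_drop_cons (cs := ['U','N','H','+'] ++ t) (a := '+') (r := t) (by simp)]
    cases hd : t.dropWhile (fun x => x != '+') with
    | nil =>
      rw [pvPieces_of_drop_nil hd]
      simp [hd]
    | cons a r =>
      rw [pvPieces_of_drop_cons hd]
      rw [pvPieces_head '+' r]
      simp only [List.getD_cons_succ, List.getD_cons_zero, List.length_cons]
      rw [pv_splitOn_single]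
      rw [pvPieces_head ':' (r.takeWhile (fun x => x != '+'))]
      simp [hd, pvPred]
  · simp [pyLoopA, pvUnh, hs]

theorem pv_scan_go_eq : ∀ (fuel : Nat) (cs : List Char), cs.length < fuel →
    pyLoopA (pvPieces '\n' cs) = pvScanGo fuel cs := by
  intro fuel
  induction fuel with
  | zero => intro cs h; omega
  | succ n ih =>
    intro cs h
    rw [pvPieces_head '\n' cs, pvLine]
    show _ = (match pvUnh (cs.takeWhile (fun c => c != '\n')) with
      | some out => String.ofList out
      | none =>
        match cs.dropWhile (fun c => c != '\n') with
        | [] => "UNKNOWN"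
        | _ :: r => pvScanGo n r)
    cases hu : pvUnh (cs.takeWhile (fun c => c != '\n')) with
    | some out => rfl
    | none =>
      show pyLoopA (pvPieces '\n' cs).tail = _
      cases hd : cs.dropWhile (fun c => c != '\n') with
      | nil =>
        rw [pvPieces_of_drop_nil hd]
        rfl
      | cons a r =>
        rw [pvPieces_of_drop_cons hd]
        have hr : r.length < n := by
          have h1 := List.length_dropWhile_le (fun c => c != '\n') cs
          rw [hd] at h1; simp at h1; omega
        simpa using ih r hr

-- ===== VERDICT (by name: the statement is the Claim_ definition above) =====
theorem extract_message_type_py_spec : Claim_equal_extract_message_type_py := by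
  intro filename content _
  unfold Spec_extract_message_type_py extract_message_type_py extract_message_type_py_alt
  simp only [pvFindToken]
  by_cases h1 : PySem.Str.isIn "UTILMD" (PySem.Str.upper filename) = true
  · rw [if_pos h1, if_pos h1]
  · rw [if_neg h1, if_neg h1]
    by_cases h2 : PySem.Str.isIn "MSCONS" (PySem.Str.upper filename) = true
    · rw [if_pos h2, if_pos h2]
    · rw [if_neg h2, if_neg h2]
      by_cases h3 : PySem.Str.isIn "APERAK" (PySem.Str.upper filename) = true
      · rw [if_pos h3, if_pos h3]
      · rw [if_neg h3, if_neg h3]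
        show pyLoopA (PySem.Chars.splitOn content.toList ['\n']) = pvScan content.toList
        rw [pv_splitOn_single]
        exact pv_scan_go_eq (content.toList.length + 1) content.toList (by omega)
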